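-- pv_equiv track=rewrite | github.com/drybell/CEEO2020 | Onshape+/contour-onshape/pixel-data.py | averagebyN
-- ===== SOURCE A (Python) =====
-- from math import floor
--
-- def averagebyN(N, plot):
-- 	offset_x = N
-- 	offset_y = N
--
-- 	max_x = len(plot)
-- 	max_y = len(plot[0])
--
-- 	# I don't think I'll care about the ends since N will generally be small
-- 	remainder_x = max_x % offset_x
-- 	remainder_y = max_y % offset_y
--
-- 	averaged_pixels = []
--
-- 	for x in range(0, max_x - remainder_x, offset_x):
-- 		for y in range(0, max_y - remainder_y, offset_y):
-- 			count = 0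
-- 			one_positions = []
-- 			for i in range(offset_x):
-- 				for j in range(offset_y):
-- 					if plot[x + i][y + j] == "1":
-- 						count += 1
-- 						one_positions.append([x + i,y + j])
-- 			if count == 0:
-- 				continue
-- 			sum_x = 0
-- 			sum_y = 0
-- 			for coords in one_positions:
-- 				sum_x += coords[0]
-- 				sum_y += coords[1]
--
-- 			new_coords = [floor(sum_x/count), floor(sum_y/count)]
-- 			averaged_pixels.append(new_coords)
--
-- 	return averaged_pixels
-- ===== SOURCE B (Python) =====
-- # Same result, different algorithm: instead of rescanning each NxN block and
-- # collecting a positions list that is summed again, scan each N-row strip once,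
-- # row by row, maintaining one (count, sum_x, sum_y) accumulator per block column,
-- # then emit the strip's blocks left to right.
-- def averagebyN(N, plot):
--     max_x = len(plot)
--     max_y = len(plot[0])
--     X = max_x - max_x % N
--     Y = max_y - max_y % N
--     nb = Y // N
--     out = []
--     for bx in range(0, X, N):
--         acc = [(0, 0, 0)] * nb
--         for x in range(bx, bx + N):
--             row = plot[x]
--             for y in range(Y):
--                 if row[y] == "1":
--                     b = y // N
--                     c, sx, sy = acc[b]
--                     acc[b] = (c + 1, sx + x, sy + y)
--         for c, sx, sy in acc:
--             if c:
--                 out.append([sx // c, sy // c])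
--     return out
-- ===== Notes on version B (the rewrite author's own statement) =====
-- stated objective: alternative
-- what changed: Instead of rescanning each NxN block and collecting a list of '1' positions that is then re-summed in a second loop, B scans each N-row strip once, row by row, maintaining one (count, sum_x, sum_y) accumulator per block column, and emits the strip's blocks left to right; no per-block position list is ever built.
import Mathlib
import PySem

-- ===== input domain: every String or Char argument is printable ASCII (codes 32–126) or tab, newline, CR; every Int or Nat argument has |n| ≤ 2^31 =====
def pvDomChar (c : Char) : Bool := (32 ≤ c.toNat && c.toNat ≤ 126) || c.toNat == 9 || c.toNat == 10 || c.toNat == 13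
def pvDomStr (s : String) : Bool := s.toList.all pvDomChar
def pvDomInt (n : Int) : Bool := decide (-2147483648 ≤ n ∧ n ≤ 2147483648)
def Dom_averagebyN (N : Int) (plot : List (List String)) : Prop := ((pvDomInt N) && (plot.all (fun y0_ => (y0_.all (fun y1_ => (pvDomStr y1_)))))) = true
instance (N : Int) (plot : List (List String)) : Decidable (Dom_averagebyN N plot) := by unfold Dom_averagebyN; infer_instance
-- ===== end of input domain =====

-- B replaces A's per-block rescan (collect a list of '1' positions, then re-sum it)
-- by a single row-major scan of each N-row strip that maintains one
-- (count, sum_x, sum_y) accumulator per block column; objective: alternative.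

-- ===== PORT A =====
-- floor(sum_x/count) is ported as floor division: exact here (integer sums, count > 0).
def averagebyN (N : Int) (plot : List (List String)) : List (List Int) :=
  let offset_x := N
  let offset_y := N
  let max_x : Int := plot.length
  let max_y : Int := (PySem.List.pyGetD plot 0 []).length
  let remainder_x := PySem.Int.mod max_x offset_x
  let remainder_y := PySem.Int.mod max_y offset_y
  (PySem.List.pyRange 0 (max_x - remainder_x) offset_x).foldl (fun averaged_pixels x =>
    (PySem.List.pyRange 0 (max_y - remainder_y) offset_y).foldl (fun averaged_pixels y =>
      let st := (PySem.List.pyRange 0 offset_x 1).foldl (fun st i =>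
        (PySem.List.pyRange 0 offset_y 1).foldl (fun (st : Int × List (List Int)) j =>
          if PySem.List.pyGetD (PySem.List.pyGetD plot (x + i) []) (y + j) "" == "1" then
            (st.1 + 1, st.2 ++ [[x + i, y + j]])
          else st) st) ((0 : Int), ([] : List (List Int)))
      if st.1 == 0 then averaged_pixels
      else
        let s := st.2.foldl (fun (s : Int × Int) coords =>
          (s.1 + PySem.List.pyGetD coords 0 0, s.2 + PySem.List.pyGetD coords 1 0)) (0, 0)
        averaged_pixels ++ [[PySem.Int.floordiv s.1 st.1, PySem.Int.floordiv s.2 st.1]])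
      averaged_pixels) []

-- ===== PORT B =====
def averagebyN_alt (N : Int) (plot : List (List String)) : List (List Int) :=
  let max_x : Int := plot.length
  let max_y : Int := (PySem.List.pyGetD plot 0 []).length
  let X := max_x - PySem.Int.mod max_x N
  let Y := max_y - PySem.Int.mod max_y N
  let nb := PySem.Int.floordiv Y N
  (PySem.List.pyRange 0 X N).foldl (fun out bx =>
    let acc0 : List (Int × Int × Int) := List.replicate nb.toNat (0, 0, 0)
    let acc := (PySem.List.pyRange bx (bx + N) 1).foldl (fun acc x =>
      let row := PySem.List.pyGetD plot x []
      (PySem.List.pyRange 0 Y 1).foldl (fun acc y =>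
        if PySem.List.pyGetD row y "" == "1" then
          let b := PySem.Int.floordiv y N
          let t := PySem.List.pyGetD acc b (0, 0, 0)
          PySem.List.pySetD acc b (t.1 + 1, t.2.1 + x, t.2.2 + y)
        else acc) acc) acc0
    acc.foldl (fun out t =>
      if t.1 ≠ 0 then
        out ++ [[PySem.Int.floordiv t.2.1 t.1, PySem.Int.floordiv t.2.2 t.1]]
      else out) out) []

-- ===== PRECONDITION & SPEC =====
-- Pre_ is exactly where the Python A returns normally: it excludes N = 0 (ZeroDivisionError),
-- empty plot (IndexError on plot[0]), and, for N ≥ 1, a row among the scanned first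
-- max_x - max_x % N rows shorter than max_y - max_y % N (IndexError).
def Pre_averagebyN (N : Int) (plot : List (List String)) : Prop :=
  N ≠ 0 ∧ plot ≠ [] ∧ (1 ≤ N →
    ∀ x : Nat, x < plot.length - plot.length % N.toNat →
      (plot.headD []).length - (plot.headD []).length % N.toNat ≤ (plot.getD x []).length)
instance (N : Int) (plot : List (List String)) : Decidable (Pre_averagebyN N plot) := by
  unfold Pre_averagebyN; infer_instance
def pvWitness_averagebyN : Int × List (List String) :=
  (2, [["1", "0", "1"], ["0", "1", "0"]])
def Spec_averagebyN (N : Int) (plot : List (List String)) (out : List (List Int)) : Prop := out = averagebyN_alt N plot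
instance (N : Int) (plot : List (List String)) (out : List (List Int)) : Decidable (Spec_averagebyN N plot out) := by unfold Spec_averagebyN; infer_instance

-- ===== CLAIM (what is proved, stated in full; the proofs are below) =====
def Claim_equal_averagebyN : Prop := ∀ (N : Int) (plot : List (List String)), Dom_averagebyN N plot → Pre_averagebyN N plot → Spec_averagebyN N plot (averagebyN N plot)

-- ===== LEMMAS AND PROOFS =====

-- the '1'-pixel test and the fused (count, sum_x, sum_y) update shared by the proofs
def pvQ (plot : List (List String)) (x y : Int) : Bool :=
  PySem.List.pyGetD (PySem.List.pyGetD plot x []) y "" == "1"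

def pvCellUpd (plot : List (List String)) (x : Int) (t : Int × Int × Int) (y : Int) : Int × Int × Int :=
  if pvQ plot x y then (t.1 + 1, t.2.1 + x, t.2.2 + y) else t

def pvStep (plot : List (List String)) (t : Int × Int × Int) (p : Int × Int) : Int × Int × Int :=
  pvCellUpd plot p.1 t p.2

def pvRowStep (plot : List (List String)) (N x : Int)
    (acc : List (Int × Int × Int)) (y : Int) : List (Int × Int × Int) :=
  if PySem.List.pyGetD (PySem.List.pyGetD plot x []) y "" == "1" then
    let b := PySem.Int.floordiv y N
    let t := PySem.List.pyGetD acc b (0, 0, 0)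
    PySem.List.pySetD acc b (t.1 + 1, t.2.1 + x, t.2.2 + y)
  else acc

def pvChunk (plot : List (List String)) (N x : Int) (b : Nat) (t : Int × Int × Int) : Int × Int × Int :=
  (PySem.List.pyRange ((b : Int) * N) (((b : Int) + 1) * N) 1).foldl (pvCellUpd plot x) t

def pvSums (ps : List (List Int)) : Int × Int :=
  ps.foldl (fun s coords =>
    (s.1 + PySem.List.pyGetD coords 0 0, s.2 + PySem.List.pyGetD coords 1 0)) (0, 0)

def pvCells (N bx y0 : Int) : List (Int × Int) :=
  (PySem.List.pyRange 0 N 1).flatMap (fun i =>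
    (PySem.List.pyRange 0 N 1).map (fun j => (bx + i, y0 + j)))

def pvStat (plot : List (List String)) (N bx y0 : Int) : Int × Int × Int :=
  (pvCells N bx y0).foldl (pvStep plot) (0, 0, 0)

def pvEmit (t : Int × Int × Int) : List (List Int) :=
  if t.1 = 0 then [] else [[PySem.Int.floordiv t.2.1 t.1, PySem.Int.floordiv t.2.2 t.1]]

def pvCanon (N : Int) (plot : List (List String)) : List (List Int) :=
  (PySem.List.pyRange 0 ((plot.length : Int) - PySem.Int.mod (plot.length : Int) N) N).flatMap
    (fun bx =>
      (PySem.List.pyRange 0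
          (((PySem.List.pyGetD plot 0 []).length : Int) -
            PySem.Int.mod ((PySem.List.pyGetD plot 0 []).length : Int) N) N).flatMap
        (fun y => pvEmit (pvStat plot N bx y)))

theorem pv_sums_append (ps : List (List Int)) (a b : Int) :
    pvSums (ps ++ [[a, b]]) = ((pvSums ps).1 + a, (pvSums ps).2 + b) := by
  unfold pvSums
  rw [List.foldl_append]
  simp [PySem.List.pyGetD, PySem.List.pyGet?, PySem.List.pyIdx?]

theorem pv_tri (plot : List (List String)) :
    ∀ (L : List (Int × Int)) (st : Int × List (List Int)),
      ((L.foldl (fun st p => if pvQ plot p.1 p.2 then (st.1 + 1, st.2 ++ [[p.1, p.2]]) else st) st).1,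
        pvSums (L.foldl (fun st p => if pvQ plot p.1 p.2 then (st.1 + 1, st.2 ++ [[p.1, p.2]]) else st) st).2)
      = L.foldl (pvStep plot) (st.1, pvSums st.2) := by
  intro L
  induction L with
  | nil => intro st; rfl
  | cons p L ih =>
    intro st
    simp only [List.foldl_cons]
    rw [ih]
    congr 1
    by_cases hq : pvQ plot p.1 p.2
    · simp [pvStep, pvCellUpd, hq, pv_sums_append]
    · simp [pvStep, pvCellUpd, hq]

theorem pv_blockA (plot : List (List String)) (N x y : Int) (acc : List (List Int)) :
    (let st := (PySem.List.pyRange 0 N 1).foldl (fun st i =>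
        (PySem.List.pyRange 0 N 1).foldl (fun (st : Int × List (List Int)) j =>
          if PySem.List.pyGetD (PySem.List.pyGetD plot (x + i) []) (y + j) "" == "1" then
            (st.1 + 1, st.2 ++ [[x + i, y + j]])
          else st) st) ((0 : Int), ([] : List (List Int)))
      if st.1 == 0 then acc
      else
        let s := st.2.foldl (fun (s : Int × Int) coords =>
          (s.1 + PySem.List.pyGetD coords 0 0, s.2 + PySem.List.pyGetD coords 1 0)) (0, 0)
        acc ++ [[PySem.Int.floordiv s.1 st.1, PySem.Int.floordiv s.2 st.1]])
      = acc ++ pvEmit (pvStat plot N x y) := by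
  have hflat : ∀ (st : Int × List (List Int)),
      (PySem.List.pyRange 0 N 1).foldl (fun st i =>
        (PySem.List.pyRange 0 N 1).foldl (fun (st : Int × List (List Int)) j =>
          if PySem.List.pyGetD (PySem.List.pyGetD plot (x + i) []) (y + j) "" == "1" then
            (st.1 + 1, st.2 ++ [[x + i, y + j]])
          else st) st) st
      = (pvCells N x y).foldl
          (fun st p => if pvQ plot p.1 p.2 then (st.1 + 1, st.2 ++ [[p.1, p.2]]) else st) st := by
    intro st
    simp only [pvCells, List.foldl_flatMap, List.foldl_map]
    rfl
  show (if ((PySem.List.pyRange 0 N 1).foldl _ ((0 : Int), ([] : List (List Int)))).1 == 0 then acc else _) = _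
  rw [hflat]
  set F := (pvCells N x y).foldl
      (fun st p => if pvQ plot p.1 p.2 then (st.1 + 1, st.2 ++ [[p.1, p.2]]) else st)
      ((0 : Int), ([] : List (List Int))) with hF
  have htri := pv_tri plot (pvCells N x y) ((0 : Int), ([] : List (List Int)))
  have h1 : F.1 = (pvStat plot N x y).1 := congrArg Prod.fst htri
  have h2 : pvSums F.2 = (pvStat plot N x y).2 := congrArg Prod.snd htri
  change (if F.1 == 0 then acc
    else acc ++ [[PySem.Int.floordiv (pvSums F.2).1 F.1, PySem.Int.floordiv (pvSums F.2).2 F.1]])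
    = acc ++ pvEmit (pvStat plot N x y)
  rw [h1, h2]
  by_cases h : (pvStat plot N x y).1 = 0 <;> simp [pvEmit, h]

theorem pv_lemA (N : Int) (plot : List (List String)) :
    averagebyN N plot = pvCanon N plot := by
  unfold averagebyN pvCanon
  simp only [pv_blockA, PySem.List.foldl_append_eq_flatMap, List.nil_append]

theorem pv_B1 (plot : List (List String)) (N x : Int) (k : Nat) :
    ∀ (L : List Int), (∀ y ∈ L, PySem.Int.floordiv y N = (k : Int)) →
    ∀ (acc : List (Int × Int × Int)), k < acc.length →
    L.foldl (pvRowStep plot N x) acc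
      = acc.set k (L.foldl (pvCellUpd plot x) (acc.getD k (0, 0, 0))) := by
  intro L
  induction L with
  | nil =>
    intro _ acc hk
    simp only [List.foldl_nil]
    rw [List.getD_eq_getElem acc _ hk]
    exact (List.set_getElem_self hk).symm
  | cons y L ih =>
    intro hall acc hk
    have hy : PySem.Int.floordiv y N = (k : Int) := hall y (List.mem_cons_self)
    have hall' : ∀ z ∈ L, PySem.Int.floordiv z N = (k : Int) := fun z hz => hall z (List.mem_cons_of_mem _ hz)
    simp only [List.foldl_cons]
    by_cases hq : pvQ plot x y
    · have hstep : pvRowStep plot N x acc y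
          = acc.set k (pvCellUpd plot x (acc.getD k (0, 0, 0)) y) := by
        have hq' := hq
        simp only [pvQ] at hq'
        unfold pvRowStep pvCellUpd
        rw [hy, if_pos hq', if_pos hq]
        simp only [PySem.List.pyGetD_natCast, PySem.List.pySetD_natCast]
      rw [hstep, ih hall' _ (by simpa using hk)]
      have hget : (acc.set k (pvCellUpd plot x (acc.getD k (0, 0, 0)) y)).getD k (0, 0, 0)
          = pvCellUpd plot x (acc.getD k (0, 0, 0)) y := by
        rw [List.getD_eq_getElem _ _ (by simpa using hk)]
        exact List.getElem_set_self (by simpa using hk)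
      rw [hget, List.set_set]
    · have hstep : pvRowStep plot N x acc y = acc := by
        have hq' := hq
        simp only [pvQ] at hq'
        unfold pvRowStep
        rw [if_neg hq']
      have hupd : pvCellUpd plot x (acc.getD k (0, 0, 0)) y = acc.getD k (0, 0, 0) := by
        unfold pvCellUpd; rw [if_neg hq]
      rw [hstep, ih hall' acc hk, hupd]

theorem pv_set_map_range {T : Type} (n k : Nat) (g : Nat → T) (v : T) :
    ((List.range n).map g).set k v = (List.range n).map (fun b => if b = k then v else g b) := by
  apply List.ext_getElem
  · simp
  · intro i h1 h2
    simp only [List.length_set, List.length_map, List.length_range] at h1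
    rw [List.getElem_set (by simpa using h1)]
    simp only [List.getElem_map, List.getElem_range]
    by_cases hik : i = k
    · simp [hik]
    · rw [if_neg hik, if_neg (by omega)]

theorem pv_getD_map_range {T : Type} (n k : Nat) (g : Nat → T) (d : T) (hk : k < n) :
    ((List.range n).map g).getD k d = g k := by
  rw [List.getD_eq_getElem _ _ (by simpa using hk)]
  simp

theorem pv_B2 (plot : List (List String)) (N x : Int) (hN : 0 < N) :
    ∀ (m k : Nat) (g : Nat → Int × Int × Int),
    (PySem.List.pyRange ((k : Int) * N) (((k + m : Nat) : Int) * N) 1).foldl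
        (pvRowStep plot N x) ((List.range (k + m)).map g)
      = (List.range (k + m)).map (fun b => if k ≤ b then pvChunk plot N x b (g b) else g b) := by
  intro m
  induction m with
  | zero =>
    intro k g
    rw [PySem.List.pyRange_one_eq_nil (le_of_eq (by push_cast; ring))]
    simp only [List.foldl_nil, Nat.add_zero]
    exact (List.map_congr_left (fun b hb => by
      simp only [List.mem_range] at hb
      rw [if_neg (by omega)])).symm
  | succ m ih =>
    intro k g
    have hsplit : PySem.List.pyRange ((k : Int) * N) (((k + (m + 1) : Nat) : Int) * N) 1
        = PySem.List.pyRange ((k : Int) * N) (((k : Int) + 1) * N) 1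
          ++ PySem.List.pyRange ((((k + 1 : Nat)) : Int) * N) (((k + 1 + m : Nat) : Int) * N) 1 := by
      have h1 : ((k : Int)) * N ≤ ((k : Int) + 1) * N := by nlinarith
      have h2 : ((k : Int) + 1) * N ≤ ((k : Int) + 1 + (m : Int)) * N := by nlinarith
      have hap := PySem.List.pyRange_one_append ((k : Int) * N) (((k : Int) + 1) * N)
        (((k : Int) + 1 + (m : Int)) * N) h1 h2
      convert hap using 3
      push_cast
      ring
    rw [hsplit, List.foldl_append]
    have hmem : ∀ y ∈ PySem.List.pyRange ((k : Int) * N) (((k : Int) + 1) * N) 1,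
        PySem.Int.floordiv y N = (k : Int) := by
      intro y hy
      rw [PySem.List.mem_pyRange_one] at hy
      rw [PySem.Int.floordiv_eq_iff_of_pos hN]
      exact ⟨hy.1, hy.2⟩
    have hchunk : (PySem.List.pyRange ((k : Int) * N) (((k : Int) + 1) * N) 1).foldl
        (pvRowStep plot N x) ((List.range (k + (m + 1))).map g)
        = ((List.range (k + (m + 1))).map g).set k
            (pvChunk plot N x k (((List.range (k + (m + 1))).map g).getD k (0, 0, 0))) := by
      rw [pv_B1 plot N x k _ hmem _ (by simp only [List.length_map, List.length_range]; omega)]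
      rfl
    rw [hchunk, pv_getD_map_range _ _ _ _ (by omega), pv_set_map_range]
    have he : k + 1 + m = k + (m + 1) := by omega
    have ih' := ih (k + 1) (fun b => if b = k then pvChunk plot N x k (g k) else g b)
    rw [he] at ih' ⊢
    rw [ih']
    apply List.map_congr_left
    intro b hb
    simp only [List.mem_range] at hb
    by_cases hbk : b = k
    · subst hbk
      rw [if_neg (by omega), if_pos rfl, if_pos (le_refl b)]
    · by_cases hkb : k ≤ b
      · rw [if_pos (by omega), if_neg hbk, if_pos hkb]
      · rw [if_neg (by omega), if_neg hbk, if_neg hkb]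

theorem pv_B3 (plot : List (List String)) (N : Int) (hN : 0 < N) (nb : Nat) :
    ∀ (rows : List Int) (g : Nat → Int × Int × Int),
    rows.foldl (fun acc x =>
        (PySem.List.pyRange 0 ((nb : Int) * N) 1).foldl (pvRowStep plot N x) acc)
      ((List.range nb).map g)
      = (List.range nb).map (fun b => rows.foldl (fun t x => pvChunk plot N x b t) (g b)) := by
  intro rows
  induction rows with
  | nil => intro g; simp
  | cons x rows ih =>
    intro g
    simp only [List.foldl_cons]
    have h2 := pv_B2 plot N x hN nb 0 (g := g)
    simp only [Nat.zero_add, Nat.cast_zero, zero_mul, Nat.zero_le, if_pos] at h2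
    rw [h2]
    rw [ih (fun b => pvChunk plot N x b (g b))]

theorem pv_statEq (plot : List (List String)) (N bx : Int) (b : Nat) :
    (PySem.List.pyRange bx (bx + N) 1).foldl (fun t x => pvChunk plot N x b t) (0, 0, 0)
      = pvStat plot N bx ((b : Int) * N) := by
  unfold pvStat pvCells pvChunk pvStep
  rw [show ((b : Int) + 1) * N = (b : Int) * N + N by ring]
  simp only [List.foldl_flatMap, List.foldl_map, PySem.List.pyRange_one, Int.sub_zero, zero_add,
    show bx + N - bx = N from by ring, show (b : Int) * N + N - (b : Int) * N = N from by ring]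

theorem pv_range_step (N : Int) (hN : 0 < N) (n : Nat) :
    PySem.List.pyRange 0 ((n : Int) * N) N = (List.range n).map (fun (b : Nat) => ((b : Int) * N)) := by
  rw [PySem.List.pyRange_of_pos _ _ hN]
  rcases Nat.eq_zero_or_pos n with h0 | hpos
  · subst h0; simp
  · rw [if_pos (by nlinarith [Int.natCast_pos.mpr hpos])]
    have hcnt : (((n : Int) * N - 0 + N - 1) / N) = (n : Int) := by
      rw [show (n : Int) * N - 0 + N - 1 = (N - 1) + (n : Int) * N from by ring,
        Int.add_mul_ediv_right _ _ (by omega), Int.ediv_eq_zero_of_lt (by omega) (by omega)]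
      ring
    rw [hcnt, Int.toNat_natCast]
    exact List.map_congr_left (fun b _ => by ring)

theorem pv_nil_neg (b N : Int) (hb : 0 ≤ b) (hN : N < 0) : PySem.List.pyRange 0 b N = [] := by
  unfold PySem.List.pyRange
  rw [if_neg (by omega)]
  simp only [show ¬ (0 : Int) < N from by omega, if_false, show ¬ b < 0 from by omega,
    List.range_zero, List.map_nil]

theorem pv_nil_zero (a b : Int) : PySem.List.pyRange a b 0 = [] := by
  simp [PySem.List.pyRange]

theorem pv_sub_mod_nonneg (a N : Int) (ha : 0 ≤ a) (hN : N < 0) :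
    0 ≤ a - PySem.Int.mod a N := by
  have := PySem.Int.mod_neg_bounds a hN
  omega

theorem pv_lemB (N : Int) (plot : List (List String)) (hN : 0 < N) :
    averagebyN_alt N plot = pvCanon N plot := by
  have hNe : N ≠ 0 := by omega
  set my : Int := ((PySem.List.pyGetD plot 0 []).length : Int) with hmy
  have hfm := PySem.Int.floordiv_mul_add_mod my N
  have hq0 : 0 ≤ PySem.Int.floordiv my N :=
    (PySem.Int.le_floordiv_iff_mul_le hN).2 (by simp [hmy])
  have hYq : my - PySem.Int.mod my N = PySem.Int.floordiv my N * N := by linarith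
  have hnb : PySem.Int.floordiv (my - PySem.Int.mod my N) N = PySem.Int.floordiv my N := by
    rw [hYq, PySem.Int.floordiv_eq_iff_of_pos hN]
    exact ⟨le_refl _, by nlinarith⟩
  have hqq : ((PySem.Int.floordiv my N).toNat : Int) = PySem.Int.floordiv my N :=
    Int.toNat_of_nonneg hq0
  set nbn := (PySem.Int.floordiv my N).toNat with hnbn
  have hY : my - PySem.Int.mod my N = (nbn : Int) * N := by rw [hYq, ← hqq]
  show (PySem.List.pyRange 0 ((plot.length : Int) - PySem.Int.mod (plot.length : Int) N) N).foldl
      (fun out bx =>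
        ((PySem.List.pyRange bx (bx + N) 1).foldl
            (fun acc x =>
              (PySem.List.pyRange 0 (my - PySem.Int.mod my N) 1).foldl (pvRowStep plot N x) acc)
            (List.replicate (PySem.Int.floordiv (my - PySem.Int.mod my N) N).toNat
              ((0 : Int), (0 : Int), (0 : Int)))).foldl
          (fun out t =>
            if t.1 ≠ 0 then
              out ++ [[PySem.Int.floordiv t.2.1 t.1, PySem.Int.floordiv t.2.2 t.1]]
            else out) out) []
    = pvCanon N plot
  rw [hnb, ← hnbn, hY]
  have hrep : List.replicate nbn ((0 : Int), (0 : Int), (0 : Int))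
      = (List.range nbn).map (fun _ => ((0 : Int), (0 : Int), (0 : Int))) := by simp
  rw [hrep]
  have hemit : (fun (out : List (List Int)) (t : Int × Int × Int) =>
      if t.1 ≠ 0 then out ++ [[PySem.Int.floordiv t.2.1 t.1, PySem.Int.floordiv t.2.2 t.1]] else out)
      = fun out t => out ++ pvEmit t := by
    funext out t
    by_cases h : t.1 = 0 <;> simp [pvEmit, h]
  simp only [pv_B3 plot N hN nbn, pv_statEq plot N, hemit,
    PySem.List.foldl_append_eq_flatMap, List.nil_append]
  unfold pvCanon
  rw [← hmy, hY, pv_range_step N hN nbn]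
  simp only [List.flatMap_map]

theorem pv_total (N : Int) (plot : List (List String)) :
    averagebyN N plot = averagebyN_alt N plot := by
  rcases lt_trichotomy N 0 with h | h | h
  · have hxA := pv_sub_mod_nonneg (plot.length : Int) N (Int.natCast_nonneg _) h
    have hyA := pv_sub_mod_nonneg ((PySem.List.pyGetD plot 0 []).length : Int) N
      (Int.natCast_nonneg _) h
    have hA : averagebyN N plot = [] := by
      simp only [averagebyN]
      rw [pv_nil_neg _ N hyA h, pv_nil_neg _ N hxA h]
      rfl
    have hB : averagebyN_alt N plot = [] := by
      simp only [averagebyN_alt]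
      rw [pv_nil_neg _ N hxA h]
      rfl
    rw [hA, hB]
  · subst h
    have hA : averagebyN 0 plot = [] := by
      simp only [averagebyN, pv_nil_zero, List.foldl_nil]
    have hB : averagebyN_alt 0 plot = [] := by
      simp only [averagebyN_alt, pv_nil_zero, List.foldl_nil]
    rw [hA, hB]
  · rw [pv_lemA, pv_lemB N plot h]

-- ===== VERDICT (by name: the statement is the Claim_ definition above) =====
theorem averagebyN_spec : Claim_equal_averagebyN := by
  intro N plot _ _
  unfold Spec_averagebyN
  exact pv_total N plot
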